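-- pv_equiv track=rewrite | github.com/benochi/pylc | jd/keys.py | keysBFS
-- ===== SOURCE A (Python) =====
-- from collections import deque
--
-- def keysBFS(rooms):
--   if len(rooms) == 0:
--     return False
--
--   q = deque()
--   visit = set()
--   q.append(0)
--   visit.add(0)
--
--   while q:
--     room = q.popleft()
--     for key in rooms[room]:
--       if key not in visit:
--         q.append(key)
--         visit.add(key)
--
--   return len(visit) == len(rooms)
-- ===== SOURCE B (Python) =====
-- def keysBFS(rooms):
--   if len(rooms) == 0:
--     return False
--   visit = {0}
--   while True:
--     new = visit | {key for room in visit for key in rooms[room]}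
--     if new == visit:
--       return len(visit) == len(rooms)
--     visit = new
-- ===== Notes on version B (the rewrite author's own statement) =====
-- stated objective: alternative
-- what changed: Replaces the deque-based BFS (pop one room, push its unseen keys) by a queue-free fixpoint closure: repeatedly union the visited set with all keys of currently visited rooms until it stops growing, then compare sizes.
import Mathlib
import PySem

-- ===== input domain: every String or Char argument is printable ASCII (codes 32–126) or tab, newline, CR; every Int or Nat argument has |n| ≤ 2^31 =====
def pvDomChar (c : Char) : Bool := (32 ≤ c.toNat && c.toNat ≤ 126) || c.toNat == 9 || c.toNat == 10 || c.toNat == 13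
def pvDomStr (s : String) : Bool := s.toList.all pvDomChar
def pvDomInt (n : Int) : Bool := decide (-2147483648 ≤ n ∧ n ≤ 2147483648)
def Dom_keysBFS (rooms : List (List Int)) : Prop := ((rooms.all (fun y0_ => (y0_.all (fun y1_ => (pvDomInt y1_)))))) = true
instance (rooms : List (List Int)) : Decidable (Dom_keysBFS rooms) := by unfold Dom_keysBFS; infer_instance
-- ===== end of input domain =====

-- B replaces A's deque-based BFS by a queue-free fixpoint closure (repeated whole-set passes
-- until the visited set stops growing); an alternative decomposition, not claimed faster.


-- ===== PORT A =====
-- inner loop 'for key in rooms[room]: if key not in visit: q.append(key); visit.add(key)'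
def keysBFSEnqueue (keys : List Int) (p : List Int × PySem.Set Int) : List Int × PySem.Set Int :=
  keys.foldl (fun p key =>
    if PySem.Set.contains p.2 key then p
    else (p.1 ++ [key], PySem.Set.add p.2 key)) p

-- the 'while q:' loop; the fuel only guards termination (inside Pre_ it never runs out:
-- each dequeued value was a distinct enqueue into visit ⊆ [-n, n)); pyGet? = none is
-- Python's IndexError on rooms[room], excluded by Pre_
def keysBFSLoop (rooms : List (List Int)) : Nat → List Int → PySem.Set Int → PySem.Set Int
  | 0, _, visit => visit
  | _ + 1, [], visit => visit
  | fuel + 1, room :: q, visit =>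
    match PySem.List.pyGet? rooms room with
    | none => visit
    | some keys =>
      let p := keysBFSEnqueue keys (q, visit)
      keysBFSLoop rooms fuel p.1 p.2

def keysBFS (rooms : List (List Int)) : Bool :=
  if rooms.length = 0 then false
  else
    let visit := keysBFSLoop rooms (2 * rooms.length + 2) [0] (PySem.Set.add PySem.Set.empty 0)
    decide (PySem.Set.len visit = (rooms.length : Int))

-- ===== PORT B =====
-- one pass: visit | {key for room in visit for key in rooms[room]}   (the result is a set,
-- so iterating visit in list order is exact; pyGet? = none is IndexError, excluded by Pre_)
def keysBFSAltStep (rooms : List (List Int)) (visit : PySem.Set Int) : PySem.Set Int :=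
  PySem.Set.union visit (visit.flatMap (fun room => (PySem.List.pyGet? rooms room).getD []))

-- 'while True: … if new == visit: return …'; the fuel only guards termination (inside Pre_
-- the set grows strictly within [-n, n), so the fixpoint is reached first)
def keysBFSAltLoop (rooms : List (List Int)) : Nat → PySem.Set Int → Bool
  | 0, _ => false
  | fuel + 1, visit =>
    let new := keysBFSAltStep rooms visit
    if PySem.Set.equal new visit then decide (PySem.Set.len visit = (rooms.length : Int))
    else keysBFSAltLoop rooms fuel new

def keysBFS_alt (rooms : List (List Int)) : Bool :=
  if rooms.length = 0 then false
  else keysBFSAltLoop rooms (2 * rooms.length + 2) (PySem.Set.add PySem.Set.empty 0)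

-- ===== PRECONDITION & SPEC =====
-- helpers for Pre_: the set of rooms reachable from room 0 (a room that is not a valid
-- Python index has no neighbours), computed as a growing closure that stops at its fixpoint
def pvNbrs (rooms : List (List Int)) (v : Int) : List Int :=
  (PySem.List.pyGet? rooms v).getD []

def pvCloStep (rooms : List (List Int)) (S : List Int) : List Int :=
  PySem.Set.update S (S.flatMap (pvNbrs rooms))

-- the reachable set: the (#keys + 2)-fold neighbour closure of {0} (the closure is stable
-- after at most #keys + 1 steps, so this IS the set of rooms reachable from room 0)
def pvReachList (rooms : List (List Int)) : List Int :=
  (pvCloStep rooms)^[rooms.flatten.length + 2] [0]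

-- Pre_ excludes exactly the inputs on which A raises IndexError: those (nonempty) inputs
-- where some key reachable from room 0 is not a valid Python index into rooms; on every
-- input A returns on, Pre_ holds.
def Pre_keysBFS (rooms : List (List Int)) : Prop :=
  rooms.length = 0 ∨
    ∀ v ∈ pvReachList rooms, -(rooms.length : Int) ≤ v ∧ v < (rooms.length : Int)
instance (rooms : List (List Int)) : Decidable (Pre_keysBFS rooms) := by
  unfold Pre_keysBFS; infer_instance

def pvWitness_keysBFS : List (List Int) := [[1], [0]]

def Spec_keysBFS (rooms : List (List Int)) (out : Bool) : Prop := out = keysBFS_alt rooms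
instance (rooms : List (List Int)) (out : Bool) : Decidable (Spec_keysBFS rooms out) := by
  unfold Spec_keysBFS; infer_instance

-- ===== CLAIM (what is proved, stated in full; the proofs are below) =====
def Claim_equal_keysBFS : Prop := ∀ (rooms : List (List Int)), Dom_keysBFS rooms → Pre_keysBFS rooms → Spec_keysBFS rooms (keysBFS rooms)

-- ===== LEMMAS AND PROOFS =====

-- the set both programs compute: the values reachable from 0 through key lists
def pvReach (rooms : List (List Int)) (v : Int) : Prop :=
  Relation.ReflTransGen (fun a b => b ∈ pvNbrs rooms a) 0 v

def pvInR (rooms : List (List Int)) (v : Int) : Prop :=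
  -(rooms.length : Int) ≤ v ∧ v < (rooms.length : Int)

lemma pvGet_mem {rooms : List (List Int)} {v : Int} {l : List Int}
    (h : PySem.List.pyGet? rooms v = some l) : l ∈ rooms := by
  unfold PySem.List.pyGet? at h
  rcases hk : PySem.List.pyIdx? rooms.length v with _ | k
  · rw [hk] at h; simp at h
  · rw [hk] at h; simp at h; exact List.mem_of_getElem? h

lemma pvGet_some {rooms : List (List Int)} {v : Int} (h : pvInR rooms v) :
    ∃ l, PySem.List.pyGet? rooms v = some l ∧ l ∈ rooms := by
  obtain ⟨h1, h2⟩ := h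
  have hidx : ∃ k, PySem.List.pyIdx? rooms.length v = some k ∧ k < rooms.length := by
    unfold PySem.List.pyIdx?
    by_cases h0 : 0 ≤ v
    · exact ⟨v.toNat, by simp [h0, h2], by omega⟩
    · refine ⟨rooms.length - (-v).toNat, by simp [h0]; omega, by omega⟩
  obtain ⟨k, hk, hlt⟩ := hidx
  refine ⟨rooms[k], ?_, List.getElem_mem hlt⟩
  unfold PySem.List.pyGet?
  rw [hk]
  simp [List.getElem?_eq_getElem hlt]

lemma pvNbrs_subset_flatten {rooms : List (List Int)} {v k : Int}
    (h : k ∈ pvNbrs rooms v) : k ∈ rooms.flatten := by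
  unfold pvNbrs at h
  rcases hg : PySem.List.pyGet? rooms v with _ | l
  · rw [hg] at h; simp at h
  · rw [hg] at h; simp at h
    exact List.mem_flatten.2 ⟨l, pvGet_mem hg, h⟩

lemma pvReach_subset {rooms : List (List Int)} {S : List Int}
    (h0 : (0 : Int) ∈ S) (hcl : ∀ v ∈ S, ∀ k ∈ pvNbrs rooms v, k ∈ S) :
    ∀ v, pvReach rooms v → v ∈ S := by
  intro v h
  induction h with
  | refl => exact h0
  | tail _ hbc ih => exact hcl _ ih _ hbc

-- the iterated closure contains its start and is closed under neighbours once the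
-- iteration count exceeds the number of values the closure can ever hold
lemma pvCloIterate_spec (rooms : List (List Int)) :
    ∀ (fuel : Nat) (S : List Int),
      rooms.flatten.length + 1 - S.length < fuel → S.Nodup →
      (∀ v ∈ S, v ∈ (0 : Int) :: rooms.flatten) →
      (∀ v ∈ S, v ∈ (pvCloStep rooms)^[fuel] S) ∧
      (∀ v ∈ (pvCloStep rooms)^[fuel] S, ∀ k ∈ pvNbrs rooms v, k ∈ (pvCloStep rooms)^[fuel] S) := by
  intro fuel
  induction fuel with
  | zero =>
    intro S hfuel
    exact absurd hfuel (by omega)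
  | succ f ih =>
    intro S hfuel hnd hsub
    have hsplit : pvCloStep rooms S
        = S ++ (PySem.Set.ofList (S.flatMap (pvNbrs rooms))).filter
            (fun y => !(PySem.Set.contains S y)) :=
      PySem.Set.update_eq_append_filter S _
    have hiter : (pvCloStep rooms)^[f + 1] S = (pvCloStep rooms)^[f] (pvCloStep rooms S) :=
      Function.iterate_succ_apply _ _ _
    by_cases hlen : (pvCloStep rooms S).length = S.length
    · have hd : (PySem.Set.ofList (S.flatMap (pvNbrs rooms))).filter
          (fun y => !(PySem.Set.contains S y)) = [] := by
        have := congrArg List.length hsplit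
        rw [hlen, List.length_append] at this
        exact List.eq_nil_of_length_eq_zero (by omega)
      have hstep : pvCloStep rooms S = S := by rw [hsplit, hd, List.append_nil]
      have hres : (pvCloStep rooms)^[f + 1] S = S := by
        rw [hiter, hstep, Function.iterate_fixed hstep]
      rw [hres]
      refine ⟨fun v hv => hv, ?_⟩
      intro v hv k hk
      have hkm : k ∈ pvCloStep rooms S :=
        (PySem.Set.mem_update S _ k).2 (Or.inr (List.mem_flatMap.2 ⟨v, hv, hk⟩))
      rwa [hstep] at hkm
    · have hnd' : (pvCloStep rooms S).Nodup := PySem.Set.nodup_update S _ hnd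
      have hsub' : ∀ v ∈ pvCloStep rooms S, v ∈ (0 : Int) :: rooms.flatten := by
        intro v hv
        rcases (PySem.Set.mem_update S _ v).1 hv with h | h
        · exact hsub v h
        · rcases List.mem_flatMap.1 h with ⟨w, _, hw⟩
          exact List.mem_cons_of_mem _ (pvNbrs_subset_flatten hw)
      have hSsub : S.length ≤ rooms.flatten.length + 1 := by
        have h1 : S.length = S.toFinset.card := (List.toFinset_card_of_nodup hnd).symm
        have h2 : S.toFinset ⊆ ((0 : Int) :: rooms.flatten).toFinset := by
          intro x hx
          rw [List.mem_toFinset] at hx ⊢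
          exact hsub x hx
        have h3 := Finset.card_le_card h2
        have h4 := List.toFinset_card_le ((0 : Int) :: rooms.flatten)
        simp only [List.length_cons] at h4
        omega
      have hgrow : S.length < (pvCloStep rooms S).length := by
        have := congrArg List.length hsplit
        rw [List.length_append] at this
        omega
      have hfuel' : rooms.flatten.length + 1 - (pvCloStep rooms S).length < f := by
        have hS'sub : (pvCloStep rooms S).length ≤ rooms.flatten.length + 1 := by
          have h1 : (pvCloStep rooms S).length = (pvCloStep rooms S).toFinset.card :=
            (List.toFinset_card_of_nodup hnd').symm
          have h2 : (pvCloStep rooms S).toFinset ⊆ ((0 : Int) :: rooms.flatten).toFinset := by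
            intro x hx
            rw [List.mem_toFinset] at hx ⊢
            exact hsub' x hx
          have h3 := Finset.card_le_card h2
          have h4 := List.toFinset_card_le ((0 : Int) :: rooms.flatten)
          simp only [List.length_cons] at h4
          omega
        omega
      obtain ⟨H1, H2⟩ := ih (pvCloStep rooms S) hfuel' hnd' hsub'
      rw [hiter]
      refine ⟨?_, H2⟩
      intro v hv
      exact H1 v ((PySem.Set.mem_update S _ v).2 (Or.inl hv))

lemma pvReach_mem (rooms : List (List Int)) :
    ∀ v, pvReach rooms v → v ∈ pvReachList rooms := by
  obtain ⟨H1, H2⟩ := pvCloIterate_spec rooms (rooms.flatten.length + 2) [0]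
    (by simp) (by simp) (by intro v hv; simp at hv; simp [hv])
  exact pvReach_subset (H1 0 (by simp)) H2

-- on every input Pre_ admits, every reachable value is a valid index
lemma pvPre_reach (rooms : List (List Int)) (hpre : Pre_keysBFS rooms)
    (hne : ¬ rooms.length = 0) : ∀ v, pvReach rooms v → pvInR rooms v := by
  intro v hv
  rcases hpre with h | h
  · exact absurd h hne
  · exact h v (pvReach_mem rooms v hv)

lemma pvLen_bound {rooms : List (List Int)} (visit : List Int)
    (hnd : visit.Nodup) (hin : ∀ v ∈ visit, pvInR rooms v) :
    visit.length ≤ 2 * rooms.length := by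
  have h1 : visit.length = visit.toFinset.card := (List.toFinset_card_of_nodup hnd).symm
  have h2 : visit.toFinset ⊆ (PySem.List.pyRange (-(rooms.length : Int)) (rooms.length : Int) 1).toFinset := by
    intro x hx
    rw [List.mem_toFinset] at hx ⊢
    rw [PySem.List.mem_pyRange_one]
    exact hin x hx
  have h3 := Finset.card_le_card h2
  have h4 := List.toFinset_card_le (PySem.List.pyRange (-(rooms.length : Int)) (rooms.length : Int) 1)
  have h5 : (PySem.List.pyRange (-(rooms.length : Int)) (rooms.length : Int) 1).length = 2 * rooms.length := by
    rw [PySem.List.length_pyRange_one]; omega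
  omega

-- the inner enqueue fold appends one block of new keys to both the queue and visit
lemma pvEnqueue_spec (keys : List Int) :
    ∀ (q visit : List Int), ∃ d,
      keysBFSEnqueue keys (q, visit) = (q ++ d, visit ++ d) ∧
      visit ++ d = PySem.Set.update visit keys := by
  induction keys with
  | nil =>
    intro q visit
    exact ⟨[], by simp [keysBFSEnqueue, PySem.Set.update]⟩
  | cons k ks ih =>
    intro q visit
    by_cases hk : k ∈ visit
    · obtain ⟨d, hd1, hd2⟩ := ih q visit
      refine ⟨d, ?_, ?_⟩
      · have hc : PySem.Set.contains visit k = true := (PySem.Set.contains_iff visit k).2 hk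
        simp only [keysBFSEnqueue, List.foldl_cons] at hd1 ⊢
        rw [hc]
        exact hd1
      · rw [hd2, PySem.Set.update_cons, PySem.Set.add_of_mem hk]
    · obtain ⟨d, hd1, hd2⟩ := ih (q ++ [k]) (visit ++ [k])
      refine ⟨k :: d, ?_, ?_⟩
      · have hc : PySem.Set.contains visit k = false := by
          rw [← Bool.not_eq_true]
          intro h; exact hk ((PySem.Set.contains_iff visit k).1 h)
        simp only [keysBFSEnqueue, List.foldl_cons] at hd1 ⊢
        rw [hc]
        simp only [if_false, Bool.false_eq_true]
        rw [PySem.Set.add_of_not_mem hk, hd1]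
        simp
      · rw [show visit ++ k :: d = (visit ++ [k]) ++ d by simp, hd2,
            PySem.Set.update_cons, PySem.Set.add_of_not_mem hk]

-- BFS loop invariant: the final visit set is nodup, reachable, contains the current visit,
-- and is closed under neighbours
lemma pvBfsLoop_spec (rooms : List (List Int))
    (hP : ∀ v, pvReach rooms v → pvInR rooms v) :
    ∀ (fuel : Nat) (q visit : List Int),
      q.length + (2 * rooms.length - visit.length) < fuel →
      visit.Nodup →
      (∀ v ∈ q, v ∈ visit) →
      (∀ v ∈ visit, pvReach rooms v) →
      (∀ v ∈ visit, v ∈ q ∨ ∀ k ∈ pvNbrs rooms v, k ∈ visit) →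
      (keysBFSLoop rooms fuel q visit).Nodup ∧
      (∀ v ∈ visit, v ∈ keysBFSLoop rooms fuel q visit) ∧
      (∀ v ∈ keysBFSLoop rooms fuel q visit, pvReach rooms v) ∧
      (∀ v ∈ keysBFSLoop rooms fuel q visit, ∀ k ∈ pvNbrs rooms v, k ∈ keysBFSLoop rooms fuel q visit) := by
  intro fuel
  induction fuel with
  | zero =>
    intro q visit hfuel
    exact absurd hfuel (by omega)
  | succ f ih =>
    intro q visit hfuel hnd hqv hreach hcl
    match q with
    | [] =>
      refine ⟨hnd, fun v hv => hv, hreach, ?_⟩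
      intro v hv k hk
      rcases hcl v hv with h | h
      · simp at h
      · exact h k hk
    | room :: qt =>
      have hroomv : room ∈ visit := hqv room (by simp)
      obtain ⟨keys, hget, _⟩ := pvGet_some (hP room (hreach room hroomv))
      have hnbrs : pvNbrs rooms room = keys := by simp [pvNbrs, hget]
      obtain ⟨d, hd1, hd2⟩ := pvEnqueue_spec keys qt visit
      have hstep : keysBFSLoop rooms (f + 1) (room :: qt) visit
          = keysBFSLoop rooms f (qt ++ d) (visit ++ d) := by
        simp only [keysBFSLoop, hget, hd1]
      have hnd' : (visit ++ d).Nodup := hd2 ▸ PySem.Set.nodup_update visit keys hnd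
      have hdis : ∀ a ∈ visit, ∀ b ∈ d, a ≠ b := (List.nodup_append.1 hnd').2.2
      have hdkeys : ∀ v ∈ d, v ∈ keys := by
        intro v hv
        have hvm : v ∈ PySem.Set.update visit keys := hd2 ▸ List.mem_append_right _ hv
        rcases (PySem.Set.mem_update visit keys v).1 hvm with h | h
        · exact absurd rfl (hdis v h v hv)
        · exact h
      have hqv' : ∀ v ∈ qt ++ d, v ∈ visit ++ d := by
        intro v hv
        rcases List.mem_append.1 hv with h | h
        · exact List.mem_append_left _ (hqv v (by simp [h]))
        · exact List.mem_append_right _ h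
      have hreach' : ∀ v ∈ visit ++ d, pvReach rooms v := by
        intro v hv
        rcases List.mem_append.1 hv with h | h
        · exact hreach v h
        · exact Relation.ReflTransGen.tail (hreach room hroomv)
            (by rw [hnbrs]; exact hdkeys v h)
      have hin' : ∀ v ∈ visit ++ d, pvInR rooms v := fun v hv => hP v (hreach' v hv)
      have hcl' : ∀ v ∈ visit ++ d, v ∈ qt ++ d ∨ ∀ k ∈ pvNbrs rooms v, k ∈ visit ++ d := by
        intro v hv
        rcases List.mem_append.1 hv with h | h
        · rcases hcl v h with h2 | h2
          · rcases List.mem_cons.1 h2 with h3 | h3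
            · right
              intro k hk
              subst h3
              rw [hd2]
              exact (PySem.Set.mem_update visit keys k).2 (Or.inr (by rw [← hnbrs]; exact hk))
            · exact Or.inl (List.mem_append_left _ h3)
          · exact Or.inr fun k hk => List.mem_append_left _ (h2 k hk)
        · exact Or.inl (List.mem_append_right _ h)
      have hlen' : (visit ++ d).length ≤ 2 * rooms.length := pvLen_bound _ hnd' hin'
      have hfuel' : (qt ++ d).length + (2 * rooms.length - (visit ++ d).length) < f := by
        simp only [List.length_append, List.length_cons] at hfuel hlen' ⊢
        omega
      obtain ⟨H1, H2, H3, H4⟩ := ih (qt ++ d) (visit ++ d) hfuel' hnd' hqv' hreach' hcl'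
      rw [hstep]
      exact ⟨H1, fun v hv => H2 v (List.mem_append_left _ hv), H3, H4⟩

lemma pvA_char (rooms : List (List Int))
    (hP : ∀ v, pvReach rooms v → pvInR rooms v)
    (hne : ¬ rooms.length = 0) :
    ∃ S : List Int, keysBFS rooms = decide (PySem.Set.len S = (rooms.length : Int)) ∧
      S.Nodup ∧ (∀ v, v ∈ S ↔ pvReach rooms v) := by
  have hinit : PySem.Set.add (PySem.Set.empty) (0 : Int) = [0] := rfl
  obtain ⟨H1, H2, H3, H4⟩ := pvBfsLoop_spec rooms hP (2 * rooms.length + 2) [0] [0]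
    (by simp; omega)
    (by simp)
    (by intro v hv; simpa using hv)
    (by intro v hv; simp at hv; subst hv; exact Relation.ReflTransGen.refl)
    (by intro v hv; exact Or.inl hv)
  refine ⟨keysBFSLoop rooms (2 * rooms.length + 2) [0] [0], ?_, H1, ?_⟩
  · unfold keysBFS
    rw [if_neg hne, hinit]
  · intro v
    refine ⟨H3 v, ?_⟩
    exact pvReach_subset (H2 0 (by simp)) H4 v

-- fixpoint loop invariant for B
lemma pvFixLoop_spec (rooms : List (List Int))
    (hP : ∀ v, pvReach rooms v → pvInR rooms v) :
    ∀ (fuel : Nat) (visit : PySem.Set Int),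
      2 * rooms.length - visit.length < fuel →
      visit.Nodup →
      (0 : Int) ∈ visit →
      (∀ v ∈ visit, pvReach rooms v) →
      ∃ S : List Int, keysBFSAltLoop rooms fuel visit = decide (PySem.Set.len S = (rooms.length : Int)) ∧
        S.Nodup ∧ (∀ v, v ∈ S ↔ pvReach rooms v) := by
  intro fuel
  induction fuel with
  | zero =>
    intro visit hfuel
    exact absurd hfuel (by omega)
  | succ f ih =>
    intro visit hfuel hnd h0 hreach
    have hnew : keysBFSAltStep rooms visit
        = PySem.Set.update visit (visit.flatMap (fun room => (PySem.List.pyGet? rooms room).getD [])) := rfl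
    have hLmem : ∀ k ∈ visit.flatMap (fun room => (PySem.List.pyGet? rooms room).getD []),
        ∃ v ∈ visit, k ∈ pvNbrs rooms v := by
      intro k hk
      rcases List.mem_flatMap.1 hk with ⟨v, hv, hk2⟩
      exact ⟨v, hv, hk2⟩
    have hmemnew : ∀ v, v ∈ keysBFSAltStep rooms visit
        ↔ v ∈ visit ∨ v ∈ visit.flatMap (fun room => (PySem.List.pyGet? rooms room).getD []) := by
      intro v
      rw [hnew]
      exact PySem.Set.mem_update visit _ v
    by_cases heq : PySem.Set.equal (keysBFSAltStep rooms visit) visit = true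
    · have hcl : ∀ v ∈ visit, ∀ k ∈ pvNbrs rooms v, k ∈ visit := by
        intro v hv k hk
        have hkL : k ∈ visit.flatMap (fun room => (PySem.List.pyGet? rooms room).getD []) :=
          List.mem_flatMap.2 ⟨v, hv, hk⟩
        exact ((PySem.Set.equal_iff _ _).1 heq k).1 ((hmemnew k).2 (Or.inr hkL))
      refine ⟨visit, ?_, hnd, ?_⟩
      · simp only [keysBFSAltLoop]
        rw [if_pos heq]
      · intro v
        exact ⟨hreach v, pvReach_subset h0 hcl v⟩
    · have hstep : keysBFSAltLoop rooms (f + 1) visit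
          = keysBFSAltLoop rooms f (keysBFSAltStep rooms visit) := by
        simp only [keysBFSAltLoop]
        rw [if_neg heq]
      have hnd' : (keysBFSAltStep rooms visit).Nodup :=
        hnew ▸ PySem.Set.nodup_update visit _ hnd
      have h0' : (0 : Int) ∈ keysBFSAltStep rooms visit := (hmemnew 0).2 (Or.inl h0)
      have hreach' : ∀ v ∈ keysBFSAltStep rooms visit, pvReach rooms v := by
        intro v hv
        rcases (hmemnew v).1 hv with h | h
        · exact hreach v h
        · obtain ⟨w, hw1, hw2⟩ := hLmem v h
          exact Relation.ReflTransGen.tail (hreach w hw1) hw2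
      have hin' : ∀ v ∈ keysBFSAltStep rooms visit, pvInR rooms v :=
        fun v hv => hP v (hreach' v hv)
      have hgrow : visit.length < (keysBFSAltStep rooms visit).length := by
        have hne : ∃ x ∈ keysBFSAltStep rooms visit, x ∉ visit := by
          by_contra hall
          push Not at hall
          apply heq
          rw [PySem.Set.equal_iff]
          intro x
          exact ⟨fun hx => hall x hx, fun hx => (hmemnew x).2 (Or.inl hx)⟩
        have hsplit : keysBFSAltStep rooms visit
            = visit ++ (PySem.Set.ofList (visit.flatMap (fun room => (PySem.List.pyGet? rooms room).getD []))).filter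
                (fun y => !(PySem.Set.contains visit y)) := by
          rw [hnew]
          exact PySem.Set.update_eq_append_filter visit _
        obtain ⟨x, hx1, hx2⟩ := hne
        rw [hsplit] at hx1 ⊢
        rcases List.mem_append.1 hx1 with h | h
        · exact absurd h hx2
        · have hpos : 0 < ((PySem.Set.ofList (visit.flatMap (fun room => (PySem.List.pyGet? rooms room).getD []))).filter
              (fun y => !(PySem.Set.contains visit y))).length := List.length_pos_of_mem h
          simp only [List.length_append]
          omega
      have hlen' : (keysBFSAltStep rooms visit).length ≤ 2 * rooms.length :=
        pvLen_bound _ hnd' hin'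
      have hfuel' : 2 * rooms.length - (keysBFSAltStep rooms visit).length < f := by omega
      obtain ⟨S, hS⟩ := ih (keysBFSAltStep rooms visit) hfuel' hnd' h0' hreach'
      rw [hstep]
      exact ⟨S, hS⟩

lemma pvB_char (rooms : List (List Int))
    (hP : ∀ v, pvReach rooms v → pvInR rooms v)
    (hne : ¬ rooms.length = 0) :
    ∃ S : List Int, keysBFS_alt rooms = decide (PySem.Set.len S = (rooms.length : Int)) ∧
      S.Nodup ∧ (∀ v, v ∈ S ↔ pvReach rooms v) := by
  have hinit : PySem.Set.add (PySem.Set.empty) (0 : Int) = [0] := rfl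
  obtain ⟨S, hS1, hS2, hS3⟩ := pvFixLoop_spec rooms hP (2 * rooms.length + 2) [0]
    (by simp; omega)
    (by simp)
    (by simp)
    (by intro v hv; simp at hv; subst hv; exact Relation.ReflTransGen.refl)
  refine ⟨S, ?_, hS2, hS3⟩
  unfold keysBFS_alt
  rw [if_neg hne, hinit]
  exact hS1

-- ===== VERDICT (by name: the statement is the Claim_ definition above) =====
theorem keysBFS_spec : Claim_equal_keysBFS := by
  intro rooms _hdom hpre
  unfold Spec_keysBFS
  by_cases hne : rooms.length = 0
  · unfold keysBFS keysBFS_alt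
    rw [if_pos hne, if_pos hne]
  · have hP := pvPre_reach rooms hpre hne
    obtain ⟨SA, hA1, hA2, hA3⟩ := pvA_char rooms hP hne
    obtain ⟨SB, hB1, hB2, hB3⟩ := pvB_char rooms hP hne
    rw [hA1, hB1]
    have hperm : SA.Perm SB :=
      (List.perm_ext_iff_of_nodup hA2 hB2).2 (fun a => (hA3 a).trans (hB3 a).symm)
    have : PySem.Set.len SA = PySem.Set.len SB := by
      simp [PySem.Set.len, hperm.length_eq]
    rw [this]
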